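-- pv_equiv track=rewrite | github.com/mwaboff/Proxy-Scraper | proxyscraper.py | crazyXORdecoding
-- ===== SOURCE A (Python) =====
-- def crazyXORdecoding(line):
--     """
--     Recursion is for losers
--     """
--     xorDict = {}
--     alist1 = line.split(";")
--     for i in alist1:
--         if "=" in i:
--             xorDict[i.split(" = ")[0]] = i.split(" = ")[1]
--
--     for i in xorDict:
--         recursiveXORdecode(xorDict, i)
--     return xorDict
--
-- def recursiveXORdecode(xorDict, akey):
--     """
--     Errr... I meant for winners!
--     """
--     if akey.isdigit():
--         return akey
--     avalue = xorDict[akey]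
--     if avalue.isdigit():
--         return avalue
--     elif "^" in avalue:
--         avalue1, avalue2 = avalue.split("^")
--         answer = str(int(recursiveXORdecode(xorDict, avalue1)) ^ int(recursiveXORdecode(xorDict, avalue2)))
--         xorDict[akey] = answer
--         return answer
-- ===== SOURCE B (Python) =====
-- def crazyXORdecoding(line):
--     # Same parsing as the original; the resolver is an iterative fixpoint:
--     # sweep the dict len(xorDict) times, resolving every expression whose
--     # operands are already plain digit strings, instead of recursing.
--     xorDict = {}
--     for i in line.split(";"):
--         if "=" in i:
--             xorDict[i.split(" = ")[0]] = i.split(" = ")[1]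
--     for _ in range(len(xorDict)):
--         for key in list(xorDict):
--             value = xorDict[key]
--             if key.isdigit() or value.isdigit() or "^" not in value:
--                 continue
--             operands = []
--             for tok in value.split("^"):
--                 s = tok if tok.isdigit() else xorDict.get(tok, "")
--                 if not s.isdigit():
--                     break
--                 operands.append(int(s))
--             else:
--                 acc = 0
--                 for v in operands:
--                     acc ^= v
--                 xorDict[key] = str(acc)
--     return xorDict
-- ===== Notes on version B (the rewrite author's own statement) =====
-- stated objective: alternative
-- what changed: Parsing is kept identical, but the recursive memoizing resolver is replaced by an iterative fixpoint: len(dict) sweeps over the dict, each resolving every XOR expression whose operands are already plain digit strings (no recursion, no call stack).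
import Mathlib
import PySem

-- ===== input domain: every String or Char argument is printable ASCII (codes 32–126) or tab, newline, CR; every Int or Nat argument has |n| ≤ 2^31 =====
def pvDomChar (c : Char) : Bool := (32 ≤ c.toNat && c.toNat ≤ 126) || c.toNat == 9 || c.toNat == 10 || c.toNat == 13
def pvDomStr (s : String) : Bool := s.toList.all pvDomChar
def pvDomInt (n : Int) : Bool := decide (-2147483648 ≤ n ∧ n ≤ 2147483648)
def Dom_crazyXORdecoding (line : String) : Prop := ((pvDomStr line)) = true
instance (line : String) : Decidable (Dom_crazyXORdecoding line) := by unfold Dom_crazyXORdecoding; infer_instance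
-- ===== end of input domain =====

-- B keeps A's parsing loop but replaces the recursive memoizing XOR resolver by an
-- iterative fixpoint (len(dict) sweeps resolving expressions whose operands are already
-- digit strings); same return value on all inputs where A returns (objective: alternative).

-- `s.split(sep)` for a nonempty literal sep (PySem.Str.split? is none only for sep = "").
def pvSplit (s sep : String) : List String := (PySem.Str.split? s sep).getD [s]

-- ===== PORT A =====
-- the parsing loop (identical in Source A and Source B, so shared by both ports);
-- pyGetD 1 "" marks the IndexError of i.split(" = ")[1] (excluded by Pre_)
def pvParse (line : String) : PySem.Dict String String :=
  (pvSplit line ";").foldl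
    (fun d i =>
      if PySem.Str.isIn "=" i then
        d.insert (PySem.List.pyGetD (pvSplit i " = ") 0 "") (PySem.List.pyGetD (pvSplit i " = ") 1 "")
      else d)
    PySem.Dict.empty

-- recursiveXORdecode; the Nat is fuel for Lean totality only (Python recursion is
-- unbounded; under Pre_ the recursion depth is ≤ size + 1, proved below).  A `none`
-- result is Python's None return or a raised KeyError/TypeError/ValueError.
def pvRecDecode : Nat → PySem.Dict String String → String → PySem.Dict String String × Option String
  | 0, d, _ => (d, none)
  | n+1, d, akey =>
    if PySem.Str.strIsdigit akey then (d, some akey)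
    else
      match d.get? akey with
      | none => (d, none)                        -- Python: KeyError (outside Pre_)
      | some avalue =>
        if PySem.Str.strIsdigit avalue then (d, some avalue)
        else if PySem.Str.isIn "^" avalue then
          match pvSplit avalue "^" with
          | [avalue1, avalue2] =>
            let r1 := pvRecDecode n d avalue1
            let r2 := pvRecDecode n r1.1 avalue2
            match r1.2.bind PySem.Int.ofStr?, r2.2.bind PySem.Int.ofStr? with
            | some x, some y =>
              let answer := PySem.Int.toStr (Int.xor x y)
              (r2.1.insert akey answer, some answer)
            | _, _ => (r2.1, none)               -- Python: TypeError int(None) (outside Pre_)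
          | _ => (d, none)                       -- Python: ValueError on unpacking (outside Pre_)
        else (d, none)                           -- falls off the end: returns None

def crazyXORdecoding (line : String) : List (String × String) :=
  let xorDict := pvParse line
  (xorDict.keys.foldl (fun d i => (pvRecDecode (xorDict.size + 1) d i).1) xorDict).items

-- ===== PORT B =====
-- Source B's inner operand loop (for tok in value.split("^") with break / for-else):
-- returns none on a break or on a failing int(s) (the latter never happens: s is a digit string)
def pvOperands (d : PySem.Dict String String) : List String → List Int → Option (List Int)
  | [], acc => some acc
  | tok :: rest, acc =>
    let s := if PySem.Str.strIsdigit tok then tok else d.getD tok ""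
    if PySem.Str.strIsdigit s then
      match PySem.Int.ofStr? s with
      | some v => pvOperands d rest (acc ++ [v])
      | none => none
    else none

def crazyXORdecoding_alt (line : String) : List (String × String) :=
  let xorDict := pvParse line
  ((PySem.List.pyRange 0 (xorDict.size : Int) 1).foldl
    (fun d _ =>
      d.keys.foldl
        (fun d key =>
          match d.get? key with
          | none => d                            -- unreachable: key comes from list(xorDict)
          | some value =>
            if PySem.Str.strIsdigit key || PySem.Str.strIsdigit value
                || !(PySem.Str.isIn "^" value) then d
            else
              match pvOperands d (pvSplit value "^") [] with
              | none => d
              | some operands =>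
                d.insert key (PySem.Int.toStr (operands.foldl (fun acc v => Int.xor acc v) 0)))
        d)
    xorDict).items

-- ===== PRECONDITION & SPEC =====
-- An entry whose expression the program actually evaluates: non-digit key, non-digit
-- value containing '^'.
def pvEligB (p : String × String) : Bool :=
  !PySem.Str.strIsdigit p.1 && !PySem.Str.strIsdigit p.2 && PySem.Str.isIn "^" p.2

-- An operand token resolves without raising: a digit literal, or a key whose stored
-- value is a digit string or itself an expression.
def pvTokOKB (d : PySem.Dict String String) (t : String) : Bool :=
  PySem.Str.strIsdigit t ||
    (match d.get? t with
     | some w => PySem.Str.strIsdigit w || PySem.Str.isIn "^" w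
     | none => false)

def pvShapeB (d : PySem.Dict String String) : Bool :=
  d.items.all (fun p =>
    !pvEligB p ||
      ((pvSplit p.2 "^").length == 2 && (pvSplit p.2 "^").all (pvTokOKB d)))

-- reference edges of the dict: from a non-digit name to the non-digit operand tokens
-- of its stored expression
def pvSuccs (d : PySem.Dict String String) (t : String) : List String :=
  if PySem.Str.strIsdigit t then []
  else match d.get? t with
    | none => []
    | some w =>
      if PySem.Str.strIsdigit w || !(PySem.Str.isIn "^" w) then []
      else (pvSplit w "^").filter (fun x => !PySem.Str.strIsdigit x)

def pvExpand (d : PySem.Dict String String) (R : PySem.Set String) : PySem.Set String :=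
  PySem.Set.update R (R.flatMap (pvSuccs d))

def pvReach (d : PySem.Dict String String) (t : String) : PySem.Set String :=
  (pvExpand d)^[d.size + 1] (PySem.Set.ofList (pvSuccs d t))

def pvAcyclicB (d : PySem.Dict String String) : Bool :=
  d.keys.all (fun k => !(pvReach d k).contains k)

def pvSegsOKB (line : String) : Bool :=
  (pvSplit line ";").all (fun i => !(PySem.Str.isIn "=" i) || PySem.Str.isIn " = " i)

-- Exactly the inputs on which the Python A returns normally: every '='-segment parses
-- (no IndexError), every evaluated expression splits into exactly two resolvable
-- operands (no ValueError/KeyError/TypeError), and the reference graph is acyclic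
-- (no RecursionError).
def Pre_crazyXORdecoding (line : String) : Prop :=
  (pvSegsOKB line && pvShapeB (pvParse line) && pvAcyclicB (pvParse line)) = true
instance (line : String) : Decidable (Pre_crazyXORdecoding line) := by
  unfold Pre_crazyXORdecoding; infer_instance

def pvWitness_crazyXORdecoding : String := "b = 1;c = b^2"

def Spec_crazyXORdecoding (line : String) (out : List (String × String)) : Prop :=
  out = crazyXORdecoding_alt line
instance (line : String) (out : List (String × String)) : Decidable (Spec_crazyXORdecoding line out) := by
  unfold Spec_crazyXORdecoding; infer_instance

-- ===== CLAIM (what is proved, stated in full; the proofs are below) =====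
def Claim_equal_crazyXORdecoding : Prop :=
  ∀ (line : String), Dom_crazyXORdecoding line → Pre_crazyXORdecoding line →
    Spec_crazyXORdecoding line (crazyXORdecoding line)

-- ===== LEMMAS AND PROOFS =====

theorem pv_xor_nonneg {a b : Int} (ha : 0 ≤ a) (hb : 0 ≤ b) : 0 ≤ Int.xor a b := by
  lift a to ℕ using ha; lift b to ℕ using hb
  exact Int.natCast_nonneg _

-- Nat.toDigitsCore facts
theorem pv_digitChar_digit (m : Nat) (h : m < 10) : PySem.Chars.isdigit (Nat.digitChar m) = true := by
  interval_cases m <;> decide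

theorem pv_toDigitsCore_digits :
    ∀ (fuel n : Nat) (ds : List Char), (∀ c ∈ ds, PySem.Chars.isdigit c = true) →
      ∀ c ∈ Nat.toDigitsCore 10 fuel n ds, PySem.Chars.isdigit c = true := by
  intro fuel
  induction fuel with
  | zero => intro n ds h c hc; exact h c hc
  | succ f ih =>
    intro n ds h c hc
    rw [Nat.toDigitsCore] at hc
    by_cases h9 : n / 10 = 0
    · simp only [h9, if_pos rfl] at hc
      rcases List.mem_cons.1 hc with h1 | h1
      · subst h1; exact pv_digitChar_digit _ (Nat.mod_lt _ (by norm_num))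
      · exact h c h1
    · simp only [h9, if_neg h9] at hc
      refine ih _ _ ?_ c hc
      intro c' hc'
      rcases List.mem_cons.1 hc' with h1 | h1
      · subst h1; exact pv_digitChar_digit _ (Nat.mod_lt _ (by norm_num))
      · exact h c' h1

theorem pv_toDigitsCore_length :
    ∀ (fuel n : Nat) (ds : List Char), ds.length ≤ (Nat.toDigitsCore 10 fuel n ds).length := by
  intro fuel
  induction fuel with
  | zero => intro n ds; simp [Nat.toDigitsCore]
  | succ f ih =>
    intro n ds
    rw [Nat.toDigitsCore]
    by_cases h9 : n / 10 = 0
    · simp [h9]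
    · simp only [h9, if_neg h9]
      calc ds.length ≤ (Nat.digitChar (n % 10) :: ds).length := by simp
        _ ≤ _ := ih _ _

theorem pv_toStr_digit (x : Int) (hx : 0 ≤ x) : PySem.Str.strIsdigit (PySem.Int.toStr x) = true := by
  have hlist : (PySem.Int.toStr x).toList = PySem.Int.toChars x := PySem.Int.toList_toStr x
  rw [show PySem.Str.strIsdigit (PySem.Int.toStr x) = PySem.Chars.strIsdigit (PySem.Int.toStr x).toList from PySem.Str.strIsdigit_eq _, hlist]
  rw [PySem.Int.toChars, if_neg (by omega)]
  unfold PySem.Chars.strIsdigit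
  rw [Nat.toDigits]
  have h1 := pv_toDigitsCore_digits (x.toNat + 1) x.toNat [] (by simp)
  rcases h : Nat.toDigitsCore 10 (x.toNat + 1) x.toNat [] with _ | ⟨c, cs⟩
  · exfalso
    rw [Nat.toDigitsCore] at h
    by_cases h9 : x.toNat / 10 = 0
    · simp [h9] at h
    · rw [if_neg h9] at h
      have hl := pv_toDigitsCore_length x.toNat (x.toNat / 10) [Nat.digitChar (x.toNat % 10)]
      rw [h] at hl
      simp at hl
  · rw [h] at h1
    simp only [List.isEmpty_cons, Bool.not_false, Bool.true_and]
    exact List.all_eq_true.2 (fun c hc => h1 c hc)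

theorem pv_isdigit_not_space (c : Char) (h : PySem.Chars.isdigit c = true) :
    PySem.Int.isIntSpace c = false := by
  revert h
  unfold PySem.Chars.isdigit PySem.Int.isIntSpace
  simp only [Bool.and_eq_true, decide_eq_true_eq, Bool.or_eq_false_iff, decide_eq_false_iff_not]
  rintro ⟨h1, h2⟩
  refine ⟨⟨⟨⟨⟨?_, ?_⟩, ?_⟩, ?_⟩, ?_⟩, ?_⟩ <;> rintro rfl <;> revert h1 <;> decide

theorem pv_dropWhile_digits (l : List Char) (h : ∀ c ∈ l, PySem.Chars.isdigit c = true) :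
    List.dropWhile PySem.Int.isIntSpace l = l := by
  cases l with
  | nil => rfl
  | cons c cs =>
    rw [List.dropWhile_cons, pv_isdigit_not_space c (h c (by simp))]
    simp

theorem pv_ofStr_nonneg (s : String) (hd : PySem.Str.strIsdigit s = true) (v : Int)
    (h : PySem.Int.ofStr? s = some v) : 0 ≤ v := by
  rw [PySem.Int.ofStr?] at h
  rw [show PySem.Str.strIsdigit s = PySem.Chars.strIsdigit s.toList from PySem.Str.strIsdigit_eq _] at hd
  revert h
  generalize s.toList = cs at hd
  unfold PySem.Chars.strIsdigit at hd
  simp only [Bool.and_eq_true, Bool.not_eq_true', List.isEmpty_eq_false_iff, List.all_eq_true] at hd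
  obtain ⟨hne, hall⟩ := hd
  intro h
  rw [PySem.Int.ofChars?] at h
  rw [pv_dropWhile_digits cs hall, pv_dropWhile_digits _ (fun c hc => hall c (List.mem_reverse.1 hc)),
      List.reverse_reverse] at h
  cases cs with
  | nil => exact absurd rfl hne
  | cons c rest =>
    have hcdig : PySem.Chars.isdigit c = true := hall c (by simp)
    split at h
    · rename_i ds heq
      rw [List.cons_eq_cons] at heq
      rw [heq.1] at hcdig
      exact absurd hcdig (by decide)
    · rename_i ds heq
      rw [List.cons_eq_cons] at heq
      rw [heq.1] at hcdig
      exact absurd hcdig (by decide)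
    · rw [Option.map_eq_some_iff] at h
      obtain ⟨a, ha, rfl⟩ := h
      rw [bind_pure_comp, Option.map_eq_map, Option.map_eq_some_iff] at ha
      obtain ⟨n, hn, rfl⟩ := ha
      exact Int.natCast_nonneg n

theorem pv_keys_length (d : PySem.Dict String String) : d.keys.length = d.size := by
  simp [PySem.Dict.keys, PySem.Dict.size]

theorem pv_mem_expand (d : PySem.Dict String String) (R : PySem.Set String) (x : String) :
    x ∈ pvExpand d R ↔ x ∈ R ∨ ∃ y ∈ R, x ∈ pvSuccs d y := by
  unfold pvExpand
  rw [PySem.Set.mem_update]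
  simp [List.mem_flatMap]

theorem pv_succs_sub_keys (d : PySem.Dict String String) (hnd : d.keys.Nodup)
    (hsh : pvShapeB d = true) (t s : String) (hs : s ∈ pvSuccs d t) : s ∈ d.keys := by
  unfold pvSuccs at hs
  split at hs
  · simp at hs
  · split at hs
    · simp at hs
    · rename_i hdt hw w heq
      split at hs
      · simp at hs
      · rename_i hguard
        rw [List.mem_filter] at hs
        obtain ⟨hmem, hsd⟩ := hs
        have hitems : (t, w) ∈ d.items := (PySem.Dict.get?_eq_some_iff_mem_items d t w hnd).1 heq
        rw [Bool.not_eq_true, Bool.or_eq_false_iff] at hguard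
        have helig : pvEligB (t, w) = true := by
          unfold pvEligB
          simp only [Bool.and_eq_true, Bool.not_eq_true']
          refine ⟨⟨by simpa using hdt, hguard.1⟩, ?_⟩
          have := hguard.2
          simpa using this
        rw [pvShapeB, List.all_eq_true] at hsh
        have := hsh (t, w) hitems
        rw [helig] at this
        simp only [Bool.not_true, Bool.false_or, Bool.and_eq_true, beq_iff_eq, List.all_eq_true] at this
        have htok := this.2 s hmem
        unfold pvTokOKB at htok
        rw [Bool.not_eq_true'] at hsd
        rw [hsd] at htok
        simp only [Bool.false_or] at htok
        rcases hgs : d.get? s with _ | w'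
        · rw [hgs] at htok; simp at htok
        · by_contra hks
          rw [← PySem.Dict.get?_eq_none_iff_not_mem_keys] at hks
          rw [hgs] at hks
          simp at hks

def pvIter (d : PySem.Dict String String) (t : String) (i : Nat) : PySem.Set String :=
  (pvExpand d)^[i] (PySem.Set.ofList (pvSuccs d t))

theorem pvIter_succ (d : PySem.Dict String String) (t : String) (i : Nat) :
    pvIter d t (i+1) = pvExpand d (pvIter d t i) := Function.iterate_succ_apply' _ _ _

theorem pvReach_eq (d : PySem.Dict String String) (t : String) :
    pvReach d t = pvIter d t (d.size + 1) := rfl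

theorem pvIter_nodup (d : PySem.Dict String String) (t : String) (i : Nat) :
    (pvIter d t i).Nodup := by
  induction i with
  | zero => exact PySem.Set.nodup_ofList _
  | succ i ih => rw [pvIter_succ]; exact PySem.Set.nodup_update _ _ ih

theorem pvIter_sub_keys (d : PySem.Dict String String) (hnd : d.keys.Nodup)
    (hsh : pvShapeB d = true) (t : String) (i : Nat) :
    ∀ x ∈ pvIter d t i, x ∈ d.keys := by
  induction i with
  | zero =>
    intro x hx
    rw [pvIter, Function.iterate_zero_apply, PySem.Set.mem_ofList] at hx
    exact pv_succs_sub_keys d hnd hsh t x hx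
  | succ i ih =>
    intro x hx
    rw [pvIter_succ, pv_mem_expand] at hx
    rcases hx with hx | ⟨y, hy, hx⟩
    · exact ih x hx
    · exact pv_succs_sub_keys d hnd hsh y x hx

theorem pvIter_grow (d : PySem.Dict String String) (t : String) (i : Nat) :
    ∀ x ∈ pvIter d t i, x ∈ pvIter d t (i+1) := by
  intro x hx
  rw [pvIter_succ, pv_mem_expand]
  exact Or.inl hx

theorem pvIter_mono (d : PySem.Dict String String) (t : String) {i j : Nat} (h : i ≤ j) :
    ∀ x ∈ pvIter d t i, x ∈ pvIter d t j := by
  induction j with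
  | zero => intro x hx; rwa [Nat.le_zero.1 h] at hx
  | succ j ih =>
    intro x hx
    rcases Nat.lt_or_ge i (j+1) with h1 | h1
    · exact pvIter_grow d t j x (ih (Nat.lt_succ_iff.1 h1) x hx)
    · rwa [Nat.le_antisymm h h1] at hx

theorem pv_expand_memcongr (d : PySem.Dict String String) {R R' : PySem.Set String}
    (h : ∀ z, z ∈ R ↔ z ∈ R') (x : String) : x ∈ pvExpand d R ↔ x ∈ pvExpand d R' := by
  rw [pv_mem_expand, pv_mem_expand]
  constructor <;> rintro (hx | ⟨y, hy, hx⟩)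
  · exact Or.inl ((h x).1 hx)
  · exact Or.inr ⟨y, (h y).1 hy, hx⟩
  · exact Or.inl ((h x).2 hx)
  · exact Or.inr ⟨y, (h y).2 hy, hx⟩

theorem pv_reach_closed (d : PySem.Dict String String) (hnd : d.keys.Nodup)
    (hsh : pvShapeB d = true) (t : String) :
    ∀ x ∈ pvExpand d (pvReach d t), x ∈ pvReach d t := by
  have hstab : ∃ i, i ≤ d.size ∧ (∀ x, x ∈ pvIter d t (i+1) ↔ x ∈ pvIter d t i) := by
    by_contra hcon
    push_neg at hcon
    have hstrict : ∀ i, i ≤ d.size + 1 → i ≤ (pvIter d t i).length := by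
      intro i
      induction i with
      | zero => intro _; exact Nat.zero_le _
      | succ i ih =>
        intro hi
        obtain ⟨x, hx⟩ := hcon i (by omega)
        have hxin : x ∈ pvIter d t (i+1) ∧ x ∉ pvIter d t i := by
          rcases hx with h | ⟨h1, h2⟩
          · exact h
          · exact absurd (pvIter_grow d t i x h2) h1
        have hsub : (x :: pvIter d t i) ⊆ pvIter d t (i+1) := by
          intro z hz
          rcases List.mem_cons.1 hz with rfl | hz
          · exact hxin.1
          · exact pvIter_grow d t i z hz
        have hnd2 : (x :: pvIter d t i).Nodup := List.nodup_cons.2 ⟨hxin.2, pvIter_nodup d t i⟩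
        have := (hnd2.subperm hsub).length_le
        simp only [List.length_cons] at this
        have := ih (by omega)
        omega
    have h1 := hstrict (d.size + 1) le_rfl
    have h2 := ((pvIter_nodup d t (d.size + 1)).subperm
      (fun x hx => pvIter_sub_keys d hnd hsh t (d.size + 1) x hx)).length_le
    rw [pv_keys_length] at h2
    omega
  obtain ⟨i, hiK, hE⟩ := hstab
  have hprop : ∀ j, i ≤ j → (∀ x, x ∈ pvIter d t j ↔ x ∈ pvIter d t i) := by
    intro j
    induction j with
    | zero => intro h x; rw [Nat.le_zero.1 h]
    | succ j ih =>
      intro hij x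
      rcases Nat.lt_or_ge i (j+1) with h1 | h1
      · have hj : i ≤ j := Nat.lt_succ_iff.1 h1
        rw [pvIter_succ]
        rw [pv_expand_memcongr d (ih hj) x, ← pvIter_succ]
        exact hE x
      · rw [Nat.le_antisymm hij h1]
  intro x hx
  rw [pvReach_eq] at hx ⊢
  rw [pv_mem_expand] at hx
  have hx' : x ∈ pvExpand d (pvIter d t i) := by
    rw [pv_mem_expand]
    rcases hx with hx | ⟨y, hy, hxy⟩
    · exact Or.inl ((hprop _ (by omega) x).1 hx)
    · exact Or.inr ⟨y, (hprop _ (by omega) y).1 hy, hxy⟩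
  rw [← pvIter_succ] at hx'
  exact pvIter_mono d t (by omega) x ((hE x).1 hx')

theorem pv_succs_sub_reach (d : PySem.Dict String String) (t s : String)
    (hs : s ∈ pvSuccs d t) : s ∈ pvReach d t := by
  rw [pvReach_eq]
  exact pvIter_mono d t (Nat.zero_le _) s
    (by rw [pvIter, Function.iterate_zero_apply, PySem.Set.mem_ofList]; exact hs)

theorem pv_reach_trans (d : PySem.Dict String String) (hnd : d.keys.Nodup)
    (hsh : pvShapeB d = true) (t s : String) (hst : s ∈ pvReach d t) :
    ∀ x ∈ pvReach d s, x ∈ pvReach d t := by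
  have key : ∀ i, ∀ x ∈ pvIter d s i, x ∈ pvReach d t := by
    intro i
    induction i with
    | zero =>
      intro x hx
      rw [pvIter, Function.iterate_zero_apply, PySem.Set.mem_ofList] at hx
      exact pv_reach_closed d hnd hsh t x ((pv_mem_expand d _ x).2 (Or.inr ⟨s, hst, hx⟩))
    | succ i ih =>
      intro x hx
      rw [pvIter_succ, pv_mem_expand] at hx
      rcases hx with hx | ⟨y, hy, hx⟩
      · exact ih x hx
      · exact pv_reach_closed d hnd hsh t x
          ((pv_mem_expand d _ x).2 (Or.inr ⟨y, ih y hy, hx⟩))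
  intro x hx
  exact key (d.size + 1) x (by rw [← pvReach_eq]; exact hx)

theorem pv_acyc_not_mem (d : PySem.Dict String String) (hac : pvAcyclicB d = true)
    (k : String) (hk : k ∈ d.keys) : k ∉ pvReach d k := by
  rw [pvAcyclicB, List.all_eq_true] at hac
  have := hac k hk
  rw [Bool.not_eq_true'] at this
  intro hmem
  rw [← PySem.Set.contains_iff] at hmem
  rw [this] at hmem
  exact Bool.noConfusion hmem

theorem pv_measure_lt (d : PySem.Dict String String) (hnd : d.keys.Nodup)
    (hsh : pvShapeB d = true) (hac : pvAcyclicB d = true) (t s : String)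
    (hs : s ∈ pvSuccs d t) : (pvReach d s).length < (pvReach d t).length := by
  have hkey : s ∈ d.keys := pv_succs_sub_keys d hnd hsh t s hs
  have hsr : s ∈ pvReach d t := pv_succs_sub_reach d t s hs
  have hnmem : s ∉ pvReach d s := pv_acyc_not_mem d hac s hkey
  have hsub : (s :: pvReach d s) ⊆ pvReach d t := by
    intro z hz
    rcases List.mem_cons.1 hz with rfl | hz
    · exact hsr
    · exact pv_reach_trans d hnd hsh t s hsr z hz
  have hnd2 : (s :: pvReach d s).Nodup := by
    rw [List.nodup_cons]
    exact ⟨hnmem, by rw [pvReach_eq]; exact pvIter_nodup d s _⟩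
  have := (hnd2.subperm hsub).length_le
  simp only [List.length_cons] at this
  omega

theorem pv_measure_lt_size (d : PySem.Dict String String) (hnd : d.keys.Nodup)
    (hsh : pvShapeB d = true) (hac : pvAcyclicB d = true) (k : String)
    (hk : k ∈ d.keys) : (pvReach d k).length < d.size := by
  have hnmem : k ∉ pvReach d k := pv_acyc_not_mem d hac k hk
  have hsub : (k :: pvReach d k) ⊆ d.keys := by
    intro z hz
    rcases List.mem_cons.1 hz with rfl | hz
    · exact hk
    · exact pvIter_sub_keys d hnd hsh k _ z (by rw [pvReach_eq] at hz; exact hz)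
  have hnd2 : (k :: pvReach d k).Nodup := by
    rw [List.nodup_cons]
    exact ⟨hnmem, by rw [pvReach_eq]; exact pvIter_nodup d k _⟩
  have := (hnd2.subperm hsub).length_le
  rw [pv_keys_length] at this
  simp only [List.length_cons] at this
  omega

def pvSVal (d : PySem.Dict String String) : Nat → String → Option String
  | 0, _ => none
  | n+1, t =>
    if PySem.Str.strIsdigit t then some t
    else match d.get? t with
      | none => none
      | some v =>
        if PySem.Str.strIsdigit v then some v
        else if PySem.Str.isIn "^" v then
          match pvSplit v "^" with
          | [l, r] =>
            match (pvSVal d n l).bind PySem.Int.ofStr?, (pvSVal d n r).bind PySem.Int.ofStr? with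
            | some a, some b => some (PySem.Int.toStr (Int.xor a b))
            | _, _ => none
          | _ => none
        else none

def pvValStr (d : PySem.Dict String String) (t : String) : Option String :=
  pvSVal d (d.size + 1) t

theorem pvSVal_isdigit (d : PySem.Dict String String) :
    ∀ (n : Nat) (t s : String), pvSVal d n t = some s → PySem.Str.strIsdigit s = true := by
  intro n
  induction n with
  | zero => intro t s h; simp [pvSVal] at h
  | succ n ih =>
    intro t s h
    rw [pvSVal] at h
    split at h
    · rename_i hd; rw [Option.some_inj] at h; rwa [← h]
    · split at h
      · exact absurd h (by simp)
      · rename_i v heq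
        split at h
        · rename_i hv; rw [Option.some_inj] at h; rwa [← h]
        · split at h
          · split at h
            · split at h
              · rename_i hba hbb
                rw [Option.some_inj] at h
                rw [← h]
                apply pv_toStr_digit
                obtain ⟨s1, hs1, ha⟩ := Option.bind_eq_some_iff.1 hba
                obtain ⟨s2, hs2, hb⟩ := Option.bind_eq_some_iff.1 hbb
                exact pv_xor_nonneg
                  (pv_ofStr_nonneg s1 (ih _ s1 hs1) _ ha)
                  (pv_ofStr_nonneg s2 (ih _ s2 hs2) _ hb)
              · exact absurd h (by simp)
            · exact absurd h (by simp)
          · exact absurd h (by simp)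

theorem pvSVal_digit_fuel (d : PySem.Dict String String) (t : String)
    (hd : PySem.Str.strIsdigit t = true) (n : Nat) (hn : 1 ≤ n) :
    pvSVal d n t = some t := by
  obtain ⟨m, rfl⟩ := Nat.exists_eq_add_of_le hn
  rw [Nat.add_comm, pvSVal, if_pos hd]

theorem pvSVal_nokey_fuel (d : PySem.Dict String String) (t : String)
    (hd : PySem.Str.strIsdigit t = false) (hg : d.get? t = none) (n : Nat) (hn : 1 ≤ n) :
    pvSVal d n t = none := by
  obtain ⟨m, rfl⟩ := Nat.exists_eq_add_of_le hn
  rw [Nat.add_comm, pvSVal, if_neg (by rw [hd]; exact Bool.false_ne_true)]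
  simp only [hg]

theorem pv_mem_succs (d : PySem.Dict String String) {t v l : String}
    (hdt : PySem.Str.strIsdigit t = false) (hgt : d.get? t = some v)
    (hdv : PySem.Str.strIsdigit v = false) (hin : PySem.Str.isIn "^" v = true)
    (hl : l ∈ pvSplit v "^") (hdl : PySem.Str.strIsdigit l = false) :
    l ∈ pvSuccs d t := by
  unfold pvSuccs
  rw [if_neg (by rw [hdt]; exact Bool.false_ne_true)]
  simp only [hgt]
  rw [if_neg (by rw [hdv, hin]; simp)]
  rw [List.mem_filter]
  exact ⟨hl, by rw [hdl]; rfl⟩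

theorem pv_sval_fuel (d : PySem.Dict String String) (hnd : d.keys.Nodup)
    (hsh : pvShapeB d = true) (hac : pvAcyclicB d = true) :
    ∀ (M : Nat) (t : String), (pvReach d t).length < M →
      ∀ (n n' : Nat), (pvReach d t).length + 2 ≤ n → (pvReach d t).length + 2 ≤ n' →
        pvSVal d n t = pvSVal d n' t := by
  intro M
  induction M with
  | zero => intro t h; omega
  | succ M ih =>
    intro t hM n n' hn hn'
    obtain ⟨a, rfl⟩ := Nat.exists_eq_add_of_le (show 1 ≤ n by omega)
    obtain ⟨b, rfl⟩ := Nat.exists_eq_add_of_le (show 1 ≤ n' by omega)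
    rw [Nat.add_comm 1 a, Nat.add_comm 1 b, pvSVal, pvSVal]
    by_cases hdt : PySem.Str.strIsdigit t = true
    · rw [if_pos hdt, if_pos hdt]
    · rw [if_neg hdt, if_neg hdt]
      rcases hgt : d.get? t with _ | v
      · simp only [hgt]
      · simp only [hgt]
        by_cases hdv : PySem.Str.strIsdigit v = true
        · rw [if_pos hdv, if_pos hdv]
        · rw [if_neg hdv, if_neg hdv]
          by_cases hin : PySem.Str.isIn "^" v = true
          · rw [if_pos hin, if_pos hin]
            have hop : ∀ x, x ∈ pvSplit v "^" → PySem.Str.strIsdigit x = false →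
                pvSVal d a x = pvSVal d b x := by
              intro x hx hdx
              rcases hgx : d.get? x with _ | w
              · rw [pvSVal_nokey_fuel d x hdx hgx a (by omega),
                    pvSVal_nokey_fuel d x hdx hgx b (by omega)]
              · have hxs : x ∈ pvSuccs d t :=
                  pv_mem_succs d (by simpa using hdt) hgt (by simpa using hdv) hin hx hdx
                have hlt := pv_measure_lt d hnd hsh hac t x hxs
                exact ih x (by omega) a b (by omega) (by omega)
            have hall : ∀ x ∈ pvSplit v "^", pvSVal d a x = pvSVal d b x := by
              intro x hx
              by_cases hdx : PySem.Str.strIsdigit x = true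
              · rw [pvSVal_digit_fuel d x hdx a (by omega),
                    pvSVal_digit_fuel d x hdx b (by omega)]
              · exact hop x hx (by simpa using hdx)
            rcases hsp : pvSplit v "^" with _ | ⟨l, rest⟩
            · simp only [hsp]
            · rcases rest with _ | ⟨r, rest2⟩
              · simp only [hsp]
              · rcases rest2 with _ | _
                · simp only [hsp]
                  rw [hall l (by rw [hsp]; simp), hall r (by rw [hsp]; simp)]
                · simp only [hsp]
          · rw [if_neg hin, if_neg hin]

def pvEligP (d : PySem.Dict String String) (k : String) : Prop :=
  PySem.Str.strIsdigit k = false ∧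
    ∃ v, d.get? k = some v ∧ PySem.Str.strIsdigit v = false ∧ PySem.Str.isIn "^" v = true

def pvTrans (d : PySem.Dict String String) (S : String → Bool) (p : String × String) :
    String × String :=
  if S p.1 then (p.1, (pvValStr d p.1).getD "") else p

def pvGood (d : PySem.Dict String String) (S : String → Bool) (c : PySem.Dict String String) :
    Prop :=
  c.items = d.items.map (pvTrans d S) ∧
  ∀ k, S k = true → pvEligP d k ∧ (pvValStr d k).isSome = true

theorem pvTrans_fst (d : PySem.Dict String String) (S : String → Bool) (p : String × String) :
    (pvTrans d S p).1 = p.1 := by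
  unfold pvTrans; split <;> rfl

theorem pvGood_keys (d : PySem.Dict String String) (S : String → Bool)
    (c : PySem.Dict String String) (hg : pvGood d S c) : c.keys = d.keys := by
  show c.items.map (·.1) = d.items.map (·.1)
  rw [hg.1, List.map_map]
  exact List.map_congr_left (fun p _ => pvTrans_fst d S p)

theorem pvGood_get?_none (d : PySem.Dict String String) (S : String → Bool)
    (c : PySem.Dict String String) (hg : pvGood d S c) (k : String)
    (h : d.get? k = none) : c.get? k = none := by
  rw [PySem.Dict.get?_eq_none_iff_not_mem_keys] at h ⊢
  rwa [pvGood_keys d S c hg]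

theorem pvGood_get?_some (d : PySem.Dict String String) (hnd : d.keys.Nodup)
    (S : String → Bool) (c : PySem.Dict String String) (hg : pvGood d S c) (k v : String)
    (h : d.get? k = some v) :
    c.get? k = some (if S k then (pvValStr d k).getD "" else v) := by
  have hcnd : c.keys.Nodup := by rw [pvGood_keys d S c hg]; exact hnd
  have hmem : (k, v) ∈ d.items := (PySem.Dict.get?_eq_some_iff_mem_items d k v hnd).1 h
  have hmem' : pvTrans d S (k, v) ∈ c.items := by
    rw [hg.1]; exact List.mem_map.2 ⟨(k, v), hmem, rfl⟩
  have : pvTrans d S (k, v) = (k, if S k then (pvValStr d k).getD "" else v) := by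
    unfold pvTrans
    by_cases hS : S (k, v).1 = true
    · rw [if_pos hS, if_pos (by simpa using hS)]
    · rw [if_neg hS, if_neg (by simpa using hS)]
  rw [this] at hmem'
  exact PySem.Dict.get?_of_mem_items c hmem' hcnd

theorem pv_mem_keys_of_get? (d : PySem.Dict String String) (k : String) (v : String)
    (h : d.get? k = some v) : k ∈ d.keys := by
  by_contra hk
  rw [← PySem.Dict.get?_eq_none_iff_not_mem_keys] at hk
  rw [h] at hk
  simp at hk

theorem pv_shape_split (d : PySem.Dict String String) (hnd : d.keys.Nodup)
    (hsh : pvShapeB d = true) (k v : String) (hg : d.get? k = some v)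
    (hdk : PySem.Str.strIsdigit k = false) (hdv : PySem.Str.strIsdigit v = false)
    (hin : PySem.Str.isIn "^" v = true) :
    ∃ l r, pvSplit v "^" = [l, r] ∧
      pvTokOKB d l = true ∧ pvTokOKB d r = true := by
  have hmem : (k, v) ∈ d.items := (PySem.Dict.get?_eq_some_iff_mem_items d k v hnd).1 hg
  rw [pvShapeB, List.all_eq_true] at hsh
  have := hsh (k, v) hmem
  have helig : pvEligB (k, v) = true := by
    unfold pvEligB
    simp only [Bool.and_eq_true, Bool.not_eq_true']
    exact ⟨⟨hdk, hdv⟩, hin⟩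
  rw [helig] at this
  simp only [Bool.not_true, Bool.false_or, Bool.and_eq_true, beq_iff_eq, List.all_eq_true] at this
  obtain ⟨hlen, htok⟩ := this
  rcases hsp : pvSplit v "^" with _ | ⟨l, rest⟩
  · rw [hsp] at hlen; simp at hlen
  · rcases rest with _ | ⟨r, rest2⟩
    · rw [hsp] at hlen; simp at hlen
    · rcases rest2 with _ | _
      · exact ⟨l, r, rfl, htok l (by rw [hsp]; simp), htok r (by rw [hsp]; simp)⟩
      · rw [hsp] at hlen; simp at hlen

theorem pv_valStr_digit (d : PySem.Dict String String) (t : String)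
    (hd : PySem.Str.strIsdigit t = true) : pvValStr d t = some t :=
  pvSVal_digit_fuel d t hd _ (by omega)

theorem pv_valStr_nokey (d : PySem.Dict String String) (t : String)
    (hd : PySem.Str.strIsdigit t = false) (hg : d.get? t = none) : pvValStr d t = none :=
  pvSVal_nokey_fuel d t hd hg _ (by omega)

theorem pv_valStr_vdigit (d : PySem.Dict String String) (t v : String)
    (hd : PySem.Str.strIsdigit t = false) (hg : d.get? t = some v)
    (hv : PySem.Str.strIsdigit v = true) : pvValStr d t = some v := by
  rw [pvValStr, pvSVal, if_neg (by rw [hd]; exact Bool.false_ne_true)]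
  simp only [hg]
  rw [if_pos hv]

theorem pv_valStr_plain (d : PySem.Dict String String) (t v : String)
    (hd : PySem.Str.strIsdigit t = false) (hg : d.get? t = some v)
    (hv : PySem.Str.strIsdigit v = false) (hin : PySem.Str.isIn "^" v = false) :
    pvValStr d t = none := by
  rw [pvValStr, pvSVal, if_neg (by rw [hd]; exact Bool.false_ne_true)]
  simp only [hg]
  rw [if_neg (by rw [hv]; exact Bool.false_ne_true), if_neg (by rw [hin]; exact Bool.false_ne_true)]

theorem pv_valStr_xor (d : PySem.Dict String String) (hnd : d.keys.Nodup)
    (hsh : pvShapeB d = true) (hac : pvAcyclicB d = true) (t v l r : String)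
    (hd : PySem.Str.strIsdigit t = false) (hg : d.get? t = some v)
    (hv : PySem.Str.strIsdigit v = false) (hin : PySem.Str.isIn "^" v = true)
    (hsp : pvSplit v "^" = [l, r]) :
    pvValStr d t =
      match (pvValStr d l).bind PySem.Int.ofStr?, (pvValStr d r).bind PySem.Int.ofStr? with
      | some a, some b => some (PySem.Int.toStr (Int.xor a b))
      | _, _ => none := by
  have htk : t ∈ d.keys := pv_mem_keys_of_get? d t v hg
  have hmt := pv_measure_lt_size d hnd hsh hac t htk
  have hK1 : 1 ≤ d.size := by
    have : d.keys ≠ [] := List.ne_nil_of_mem htk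
    have := List.length_pos_of_ne_nil this
    rw [pv_keys_length] at this
    omega
  have hop : ∀ x, x ∈ pvSplit v "^" → pvSVal d d.size x = pvValStr d x := by
    intro x hx
    by_cases hdx : PySem.Str.strIsdigit x = true
    · rw [pvSVal_digit_fuel d x hdx _ (by omega), pv_valStr_digit d x hdx]
    · rcases hgx : d.get? x with _ | w
      · rw [pvSVal_nokey_fuel d x (by simpa using hdx) hgx _ (by omega),
            pv_valStr_nokey d x (by simpa using hdx) hgx]
      · have hxs : x ∈ pvSuccs d t :=
          pv_mem_succs d hd hg hv hin hx (by simpa using hdx)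
        have hlt := pv_measure_lt d hnd hsh hac t x hxs
        exact pv_sval_fuel d hnd hsh hac ((pvReach d x).length + 1) x (by omega)
          d.size (d.size + 1) (by omega) (by omega)
  rw [pvValStr, pvSVal, if_neg (by rw [hd]; exact Bool.false_ne_true)]
  simp only [hg]
  rw [if_neg (by rw [hv]; exact Bool.false_ne_true), if_pos hin]
  simp only [hsp]
  rw [hop l (by rw [hsp]; simp), hop r (by rw [hsp]; simp)]

theorem pvGood_insert (d : PySem.Dict String String) (hnd : d.keys.Nodup)
    (S : String → Bool) (c : PySem.Dict String String) (hg : pvGood d S c)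
    (t u : String) (helig : pvEligP d t) (hu : pvValStr d t = some u) :
    pvGood d (fun j => S j || j == t) (c.insert t u) := by
  have htk : t ∈ d.keys := by
    obtain ⟨_, v, hv, _⟩ := helig
    exact pv_mem_keys_of_get? d t v hv
  have hct : c.contains t = true := by
    rw [PySem.Dict.contains_iff_mem_keys, pvGood_keys d S c hg]
    exact htk
  constructor
  · rw [PySem.Dict.items_insert_of_contains c u hct, hg.1, List.map_map]
    apply List.map_congr_left
    intro p _
    show (if (pvTrans d S p).1 == t then (t, u) else pvTrans d S p)
        = pvTrans d (fun j => S j || j == t) p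
    rw [pvTrans_fst]
    by_cases hpt : p.1 = t
    · rw [if_pos (by simp [hpt])]
      unfold pvTrans
      rw [if_pos (by simp [hpt])]
      rw [hpt, hu]
      rfl
    · rw [if_neg (by simp [hpt])]
      unfold pvTrans
      by_cases hS : S p.1 = true
      · rw [if_pos hS, if_pos (by simp [hS])]
      · rw [if_neg hS, if_neg (by simp [hpt]; simpa using hS)]
  · intro k hk
    simp only [Bool.or_eq_true, beq_iff_eq] at hk
    rcases hk with hk | rfl
    · exact hg.2 k hk
    · exact ⟨helig, by rw [hu]; rfl⟩

theorem pvRecDecode_spec (d : PySem.Dict String String) (hnd : d.keys.Nodup)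
    (hsh : pvShapeB d = true) (hac : pvAcyclicB d = true) :
    ∀ (n : Nat) (t : String), (pvReach d t).length + 2 ≤ n →
    ∀ (c : PySem.Dict String String) (S : String → Bool), pvGood d S c →
    ∃ S', (∀ j, S j = true → S' j = true) ∧
          pvGood d S' (pvRecDecode n c t).1 ∧
          (pvEligP d t → (pvValStr d t).isSome = true → S' t = true) ∧
          (pvRecDecode n c t).2 = pvValStr d t := by
  intro n
  induction n with
  | zero => intro t hb; omega
  | succ n ih =>
    intro t hb c S hg
    rw [pvRecDecode]
    by_cases hdt : PySem.Str.strIsdigit t = true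
    · rw [if_pos hdt]
      refine ⟨S, fun j h => h, hg, ?_, by rw [pv_valStr_digit d t hdt]⟩
      intro helig
      rw [helig.1] at hdt
      exact absurd hdt (by simp)
    · rw [if_neg hdt]
      rcases hgt : d.get? t with _ | v
      · have hc := pvGood_get?_none d S c hg t hgt
        simp only [hc]
        refine ⟨S, fun j h => h, hg, ?_, by rw [pv_valStr_nokey d t (by simpa using hdt) hgt]⟩
        intro helig
        obtain ⟨_, w, hw, _⟩ := helig
        rw [hgt] at hw
        simp at hw
      · have hc := pvGood_get?_some d hnd S c hg t v hgt
        by_cases hSt : S t = true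
        · rw [if_pos hSt] at hc
          obtain ⟨helig, hisS⟩ := hg.2 t hSt
          obtain ⟨u, hu⟩ := Option.isSome_iff_exists.1 hisS
          rw [hu] at hc
          simp only [Option.getD_some] at hc
          have hud : PySem.Str.strIsdigit u = true := pvSVal_isdigit d _ t u hu
          simp only [hc]
          rw [if_pos hud]
          exact ⟨S, fun j h => h, hg, fun _ _ => hSt, by rw [hu]⟩
        · rw [if_neg hSt] at hc
          simp only [hc]
          by_cases hdv : PySem.Str.strIsdigit v = true
          · rw [if_pos hdv]
            refine ⟨S, fun j h => h, hg, ?_,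
              by rw [pv_valStr_vdigit d t v (by simpa using hdt) hgt hdv]⟩
            intro helig
            obtain ⟨_, w, hw, hwd, _⟩ := helig
            rw [hgt] at hw
            rw [Option.some_inj] at hw
            rw [← hw] at hwd
            rw [hdv] at hwd
            exact absurd hwd (by simp)
          · rw [if_neg hdv]
            by_cases hin : PySem.Str.isIn "^" v = true
            · rw [if_pos hin]
              have helig : pvEligP d t :=
                ⟨by simpa using hdt, v, hgt, by simpa using hdv, hin⟩
              obtain ⟨l, r, hsp, htl, htr⟩ :=
                pv_shape_split d hnd hsh t v hgt (by simpa using hdt) (by simpa using hdv) hin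
              have hn1 : 1 ≤ n := by omega
              have hstep : ∀ x, x ∈ pvSplit v "^" →
                  ∀ (c' : PySem.Dict String String) (S'' : String → Bool), pvGood d S'' c' →
                  ∃ S₃, (∀ j, S'' j = true → S₃ j = true) ∧
                        pvGood d S₃ (pvRecDecode n c' x).1 ∧
                        (pvRecDecode n c' x).2 = pvValStr d x := by
                intro x hx c' S'' hg'
                obtain ⟨m, hm⟩ : ∃ m, n = m + 1 := ⟨n - 1, by omega⟩
                by_cases hdx : PySem.Str.strIsdigit x = true
                · rw [hm, pvRecDecode, if_pos hdx]
                  exact ⟨S'', fun j h => h, hg', by rw [pv_valStr_digit d x hdx]⟩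
                · rcases hgx : d.get? x with _ | w
                  · rw [hm, pvRecDecode, if_neg hdx]
                    have hc' := pvGood_get?_none d S'' c' hg' x hgx
                    simp only [hc']
                    exact ⟨S'', fun j h => h, hg',
                      by rw [pv_valStr_nokey d x (by simpa using hdx) hgx]⟩
                  · have hxs : x ∈ pvSuccs d t :=
                      pv_mem_succs d (by simpa using hdt) hgt (by simpa using hdv) hin hx
                        (by simpa using hdx)
                    have hlt := pv_measure_lt d hnd hsh hac t x hxs
                    obtain ⟨S₃, hmono, hgood, _, hsnd⟩ := ih x (by omega) c' S'' hg'
                    exact ⟨S₃, hmono, hgood, hsnd⟩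
              rcases hr1 : pvRecDecode n c l with ⟨c1, o1⟩
              obtain ⟨S1, hm1, hg1, ho1⟩ := hstep l (by rw [hsp]; simp) c S hg
              rw [hr1] at hg1 ho1
              rcases hr2 : pvRecDecode n c1 r with ⟨c2, o2⟩
              obtain ⟨S2, hm2, hg2, ho2⟩ := hstep r (by rw [hsp]; simp) c1 S1 hg1
              rw [hr2] at hg2 ho2
              simp only at ho1 ho2
              have hvt := pv_valStr_xor d hnd hsh hac t v l r (by simpa using hdt) hgt
                (by simpa using hdv) hin hsp
              simp only [hsp, hr1, hr2]
              rw [ho1, ho2]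
              rcases hb1 : (pvValStr d l).bind PySem.Int.ofStr? with _ | a
              · rw [hb1] at hvt
                simp only [hb1]
                refine ⟨S2, fun j h => hm2 j (hm1 j h), hg2, ?_, by rw [hvt]⟩
                intro _ hisS
                rw [hvt] at hisS
                simp at hisS
              · rcases hb2 : (pvValStr d r).bind PySem.Int.ofStr? with _ | b
                · rw [hb1, hb2] at hvt
                  simp only [hb1, hb2]
                  refine ⟨S2, fun j h => hm2 j (hm1 j h), hg2, ?_, by rw [hvt]⟩
                  intro _ hisS
                  rw [hvt] at hisS
                  simp at hisS
                · rw [hb1, hb2] at hvt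
                  simp only [hb1, hb2]
                  refine ⟨fun j => S2 j || j == t, ?_, ?_, ?_, ?_⟩
                  · intro j h
                    simp only [hm2 j (hm1 j h), Bool.true_or]
                  · exact pvGood_insert d hnd S2 c2 hg2 t _ helig hvt
                  · intro _ _
                    simp
                  · rw [hvt]
            · rw [if_neg hin]
              refine ⟨S, fun j h => h, hg, ?_,
                by rw [pv_valStr_plain d t v (by simpa using hdt) hgt (by simpa using hdv)
                        (by simpa using hin)]⟩
              intro helig
              obtain ⟨_, w, hw, _, hwin⟩ := helig
              rw [hgt] at hw
              rw [Option.some_inj] at hw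
              rw [← hw] at hwin
              rw [hwin] at hin
              exact absurd rfl hin

theorem pv_zero_xor (a : Int) : Int.xor 0 a = a := by
  cases a with
  | ofNat m => simp [Int.xor]
  | negSucc m => simp [Int.xor]

def pvBStep (c : PySem.Dict String String) (key : String) : PySem.Dict String String :=
  match c.get? key with
  | none => c
  | some value =>
    if PySem.Str.strIsdigit key || PySem.Str.strIsdigit value
        || !(PySem.Str.isIn "^" value) then c
    else
      match pvOperands c (pvSplit value "^") [] with
      | none => c
      | some operands =>
        c.insert key (PySem.Int.toStr (operands.foldl (fun acc v => Int.xor acc v) 0))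

def pvOpS (c : PySem.Dict String String) (x : String) : String :=
  if PySem.Str.strIsdigit x then x else c.getD x ""

def pvReady (d : PySem.Dict String String) (S : String → Bool) (k : String) : Prop :=
  ∀ x ∈ pvSuccs d k, S x = true ∨ ∃ w, d.get? x = some w ∧ PySem.Str.strIsdigit w = true

theorem pvOpTok (d : PySem.Dict String String) (hnd : d.keys.Nodup)
    (c : PySem.Dict String String) (S : String → Bool) (hg : pvGood d S c) (x : String) :
    (PySem.Str.strIsdigit (pvOpS c x) = true →
       PySem.Int.ofStr? (pvOpS c x) = (pvValStr d x).bind PySem.Int.ofStr?) ∧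
    ((PySem.Str.strIsdigit x = true ∨ S x = true ∨
        (∃ w, d.get? x = some w ∧ PySem.Str.strIsdigit w = true)) →
       PySem.Str.strIsdigit (pvOpS c x) = true) := by
  unfold pvOpS
  by_cases hdx : PySem.Str.strIsdigit x = true
  · rw [if_pos hdx]
    refine ⟨fun _ => ?_, fun _ => hdx⟩
    rw [pv_valStr_digit d x hdx]
    rfl
  · rw [if_neg hdx]
    rw [PySem.Dict.getD_eq_get?_getD]
    rcases hgx : d.get? x with _ | w
    · rw [pvGood_get?_none d S c hg x hgx]
      constructor
      · intro habs
        exact absurd habs (by decide)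
      · rintro (h | h | ⟨w, hw, _⟩)
        · exact absurd h hdx
        · obtain ⟨⟨_, v, hv, _⟩, _⟩ := hg.2 x h
          rw [hgx] at hv
          simp at hv
        · simp at hw
    · rw [pvGood_get?_some d hnd S c hg x w hgx]
      by_cases hSx : S x = true
      · rw [if_pos hSx]
        obtain ⟨_, hisS⟩ := hg.2 x hSx
        obtain ⟨u, hu⟩ := Option.isSome_iff_exists.1 hisS
        rw [hu]
        simp only [Option.getD_some]
        have hud := pvSVal_isdigit d _ x u hu
        exact ⟨fun _ => rfl, fun _ => hud⟩
      · rw [if_neg hSx]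
        simp only [Option.getD_some]
        constructor
        · intro hwd
          rw [pv_valStr_vdigit d x w (by simpa using hdx) hgx hwd]
          rfl
        · rintro (h | h | ⟨w', hw', hwd'⟩)
          · exact absurd h hdx
          · exact absurd h hSx
          · rw [Option.some_inj] at hw'
            rwa [hw']

theorem pvOperands_cons (dict : PySem.Dict String String) (tok : String) (rest : List String)
    (acc : List Int) :
    pvOperands dict (tok :: rest) acc =
      (if PySem.Str.strIsdigit (pvOpS dict tok) = true then
        match PySem.Int.ofStr? (pvOpS dict tok) with
        | some v => pvOperands dict rest (acc ++ [v])
        | none => none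
       else none) := rfl

theorem pvOperands_nil (dict : PySem.Dict String String) (acc : List Int) :
    pvOperands dict [] acc = some acc := rfl

theorem pvBStep_spec (d : PySem.Dict String String) (hnd : d.keys.Nodup)
    (hsh : pvShapeB d = true) (hac : pvAcyclicB d = true)
    (c : PySem.Dict String String) (S : String → Bool) (hg : pvGood d S c)
    (k : String) (hk : k ∈ d.keys) :
    ∃ S', (∀ j, S j = true → S' j = true) ∧ pvGood d S' (pvBStep c k) ∧
      (pvEligP d k → (pvValStr d k).isSome = true → pvReady d S k → S' k = true) := by
  obtain ⟨v, hv⟩ : ∃ v, d.get? k = some v := by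
    rcases h : d.get? k with _ | v
    · rw [PySem.Dict.get?_eq_none_iff_not_mem_keys] at h
      exact absurd hk h
    · exact ⟨v, rfl⟩
  have hc := pvGood_get?_some d hnd S c hg k v hv
  unfold pvBStep
  by_cases hSk : S k = true
  · rw [if_pos hSk] at hc
    obtain ⟨helig, hisS⟩ := hg.2 k hSk
    obtain ⟨u, hu⟩ := Option.isSome_iff_exists.1 hisS
    rw [hu] at hc
    simp only [Option.getD_some] at hc
    simp only [hc]
    have hud := pvSVal_isdigit d _ k u hu
    rw [if_pos (by rw [hud]; simp)]
    exact ⟨S, fun j h => h, hg, fun _ _ _ => hSk⟩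
  · rw [if_neg hSk] at hc
    simp only [hc]
    by_cases hguard : (PySem.Str.strIsdigit k || PySem.Str.strIsdigit v
        || !(PySem.Str.isIn "^" v)) = true
    · rw [if_pos hguard]
      refine ⟨S, fun j h => h, hg, ?_⟩
      intro helig _ _
      obtain ⟨hdk, w, hw, hwd, hwin⟩ := helig
      rw [hv] at hw
      rw [Option.some_inj] at hw
      rw [← hw] at hwd hwin
      rw [hdk, hwd, hwin] at hguard
      simp at hguard
    · rw [if_neg hguard]
      simp only [Bool.or_eq_true, Bool.not_eq_true', not_or] at hguard
      obtain ⟨⟨h1, h2⟩, h3⟩ := hguard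
      rw [Bool.not_eq_true] at h1 h2
      rw [Bool.not_eq_false] at h3
      have helig : pvEligP d k := ⟨h1, v, hv, h2, h3⟩
      obtain ⟨l, r, hsp, htl, htr⟩ := pv_shape_split d hnd hsh k v hv h1 h2 h3
      simp only [hsp]
      obtain ⟨hb_l, hr_l⟩ := pvOpTok d hnd c S hg l
      obtain ⟨hb_r, hr_r⟩ := pvOpTok d hnd c S hg r
      have hvt := pv_valStr_xor d hnd hsh hac k v l r h1 hv h2 h3 hsp
      have hreadyop : ∀ x, x ∈ pvSplit v "^" → pvReady d S k →
          (PySem.Str.strIsdigit x = true ∨ S x = true ∨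
            (∃ w, d.get? x = some w ∧ PySem.Str.strIsdigit w = true)) := by
        intro x hx hready
        by_cases hdx : PySem.Str.strIsdigit x = true
        · exact Or.inl hdx
        · have hxs : x ∈ pvSuccs d k :=
            pv_mem_succs d h1 hv h2 h3 hx (by simpa using hdx)
          rcases hready x hxs with h | h
          · exact Or.inr (Or.inl h)
          · exact Or.inr (Or.inr h)
      rw [pvOperands_cons]
      by_cases hdl : PySem.Str.strIsdigit (pvOpS c l) = true
      · rw [if_pos hdl]
        rcases hof_l : PySem.Int.ofStr? (pvOpS c l) with _ | a
        · simp only [hof_l]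
          refine ⟨S, fun j h => h, hg, ?_⟩
          intro _ hisS _
          have hA1 : (pvValStr d l).bind PySem.Int.ofStr? = none := by
            rw [← hb_l hdl, hof_l]
          rw [hA1] at hvt
          simp only at hvt
          rw [hvt] at hisS
          simp at hisS
        · simp only [hof_l]
          rw [pvOperands_cons]
          by_cases hdr : PySem.Str.strIsdigit (pvOpS c r) = true
          · rw [if_pos hdr]
            rcases hof_r : PySem.Int.ofStr? (pvOpS c r) with _ | b
            · simp only [hof_r]
              refine ⟨S, fun j h => h, hg, ?_⟩
              intro _ hisS _
              have hA2 : (pvValStr d r).bind PySem.Int.ofStr? = none := by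
                rw [← hb_r hdr, hof_r]
              rw [hA2] at hvt
              have hA1 : (pvValStr d l).bind PySem.Int.ofStr? = some a := by
                rw [← hb_l hdl, hof_l]
              rw [hA1] at hvt
              simp only at hvt
              rw [hvt] at hisS
              simp at hisS
            · simp only [hof_r, pvOperands_nil]
              have hA1 : (pvValStr d l).bind PySem.Int.ofStr? = some a := by
                rw [← hb_l hdl, hof_l]
              have hA2 : (pvValStr d r).bind PySem.Int.ofStr? = some b := by
                rw [← hb_r hdr, hof_r]
              rw [hA1, hA2] at hvt
              simp only at hvt
              have hfold : (([] ++ [a] ++ [b]).foldl (fun acc v => Int.xor acc v) 0)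
                  = Int.xor a b := by
                simp only [List.nil_append, List.singleton_append, List.foldl_cons,
                  List.foldl_nil]
                rw [pv_zero_xor]
              rw [hfold]
              refine ⟨fun j => S j || j == k, ?_, ?_, ?_⟩
              · intro j h
                simp only [h, Bool.true_or]
              · exact pvGood_insert d hnd S c hg k _ helig hvt
              · intro _ _ _
                simp
          · rw [if_neg hdr]
            refine ⟨S, fun j h => h, hg, ?_⟩
            intro helig' hisS hready
            exact absurd (hr_r (hreadyop r (by rw [hsp]; simp) hready)) hdr
      · rw [if_neg hdl]
        refine ⟨S, fun j h => h, hg, ?_⟩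
        intro helig' hisS hready
        exact absurd (hr_l (hreadyop l (by rw [hsp]; simp) hready)) hdl

theorem pvSweep_spec (d : PySem.Dict String String) (hnd : d.keys.Nodup)
    (hsh : pvShapeB d = true) (hac : pvAcyclicB d = true) :
    ∀ (ks : List String), (∀ x ∈ ks, x ∈ d.keys) →
    ∀ (c : PySem.Dict String String) (S : String → Bool), pvGood d S c →
    ∃ S', (∀ j, S j = true → S' j = true) ∧ pvGood d S' (ks.foldl pvBStep c) ∧
          (∀ k ∈ ks, pvEligP d k → (pvValStr d k).isSome = true → pvReady d S k →
            S' k = true) := by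
  intro ks
  induction ks with
  | nil => intro _ c S hg; exact ⟨S, fun j h => h, hg, by simp⟩
  | cons k ks ih =>
    intro hks c S hg
    obtain ⟨S1, hm1, hg1, hp1⟩ :=
      pvBStep_spec d hnd hsh hac c S hg k (hks k (by simp))
    obtain ⟨S2, hm2, hg2, hp2⟩ := ih (fun x hx => hks x (by simp [hx])) (pvBStep c k) S1 hg1
    refine ⟨S2, fun j h => hm2 j (hm1 j h), by simpa using hg2, ?_⟩
    intro k' hk' helig hisS hready
    rcases List.mem_cons.1 hk' with rfl | hk'
    · exact hm2 k' (hp1 helig hisS hready)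
    · refine hp2 k' hk' helig hisS ?_
      intro x hx
      rcases hready x hx with h | h
      · exact Or.inl (hm1 x h)
      · exact Or.inr h

def pvCov (d : PySem.Dict String String) (i : Nat) (S : String → Bool) : Prop :=
  ∀ k ∈ d.keys, pvEligP d k → (pvValStr d k).isSome = true →
    (pvReach d k).length < i → S k = true

theorem pv_succs_elim (d : PySem.Dict String String) {k v x : String}
    (hv : d.get? k = some v) (hx : x ∈ pvSuccs d k) :
    x ∈ pvSplit v "^" ∧ PySem.Str.strIsdigit x = false := by
  unfold pvSuccs at hx
  split at hx
  · simp at hx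
  · rw [hv] at hx
    simp only at hx
    split at hx
    · simp at hx
    · rw [List.mem_filter] at hx
      exact ⟨hx.1, by simpa using hx.2⟩

theorem pv_ready_of_cov (d : PySem.Dict String String) (hnd : d.keys.Nodup)
    (hsh : pvShapeB d = true) (hac : pvAcyclicB d = true) (S : String → Bool) (i : Nat)
    (hcov : pvCov d i S) (k : String) (helig : pvEligP d k)
    (hisS : (pvValStr d k).isSome = true) (hkm : (pvReach d k).length ≤ i) :
    pvReady d S k := by
  obtain ⟨hdk, v, hv, hdv, hin⟩ := helig
  obtain ⟨l, r, hsp, htl, htr⟩ := pv_shape_split d hnd hsh k v hv hdk hdv hin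
  have hvt := pv_valStr_xor d hnd hsh hac k v l r hdk hv hdv hin hsp
  intro x hxs
  obtain ⟨hxsp, hdx⟩ := pv_succs_elim d hv hxs
  have hxkey : x ∈ d.keys := pv_succs_sub_keys d hnd hsh k x hxs
  have htok : pvTokOKB d x = true := by
    rw [hsp] at hxsp
    rcases List.mem_cons.1 hxsp with rfl | hxsp
    · exact htl
    · rcases List.mem_cons.1 hxsp with rfl | hxsp
      · exact htr
      · simp at hxsp
  unfold pvTokOKB at htok
  rw [hdx] at htok
  simp only [Bool.false_or] at htok
  rcases hgx : d.get? x with _ | w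
  · rw [hgx] at htok; simp at htok
  · rw [hgx] at htok
    simp only [Bool.or_eq_true] at htok
    by_cases hdw : PySem.Str.strIsdigit w = true
    · exact Or.inr ⟨w, rfl, hdw⟩
    · have hwin : PySem.Str.isIn "^" w = true := by
        rcases htok with h | h
        · exact absurd h hdw
        · exact h
      have heligx : pvEligP d x := ⟨hdx, w, hgx, by simpa using hdw, hwin⟩
      have hisSx : (pvValStr d x).isSome = true := by
        rcases hbl : (pvValStr d l).bind PySem.Int.ofStr? with _ | a
        · rw [hbl] at hvt
          simp only at hvt
          rw [hvt] at hisS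
          simp at hisS
        · rcases hbr : (pvValStr d r).bind PySem.Int.ofStr? with _ | b
          · rw [hbl, hbr] at hvt
            simp only at hvt
            rw [hvt] at hisS
            simp at hisS
          · rw [hsp] at hxsp
            rcases List.mem_cons.1 hxsp with rfl | hxsp
            · obtain ⟨s1, hs1, _⟩ := Option.bind_eq_some_iff.1 hbl
              rw [hs1]; rfl
            · rcases List.mem_cons.1 hxsp with rfl | hxsp
              · obtain ⟨s2, hs2, _⟩ := Option.bind_eq_some_iff.1 hbr
                rw [hs2]; rfl
              · simp at hxsp
      have hmx : (pvReach d x).length < (pvReach d k).length :=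
        pv_measure_lt d hnd hsh hac k x hxs
      exact Or.inl (hcov x hxkey heligx hisSx (by omega))

theorem pvRounds (d : PySem.Dict String String) (hnd : d.keys.Nodup)
    (hsh : pvShapeB d = true) (hac : pvAcyclicB d = true) :
    ∀ (L : List Int) (i : Nat) (c : PySem.Dict String String) (S : String → Bool),
      pvGood d S c → pvCov d i S →
      ∃ S', pvGood d S' (L.foldl (fun c _ => c.keys.foldl pvBStep c) c) ∧
            pvCov d (i + L.length) S' := by
  intro L
  induction L with
  | nil => intro i c S hg hcov; exact ⟨S, hg, by simpa using hcov⟩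
  | cons hd L ih =>
    intro i c S hg hcov
    simp only [List.foldl_cons]
    rw [pvGood_keys d S c hg]
    obtain ⟨S1, hm1, hg1, hp1⟩ := pvSweep_spec d hnd hsh hac d.keys (fun x h => h) c S hg
    have hcov1 : pvCov d (i + 1) S1 := by
      intro k hk helig hisS hkm
      exact hp1 k hk helig hisS
        (pv_ready_of_cov d hnd hsh hac S i hcov k helig hisS (by omega))
    obtain ⟨S2, hg2, hcov2⟩ := ih (i + 1) _ S1 hg1 hcov1
    refine ⟨S2, hg2, ?_⟩
    intro k hk helig hisS hkm
    exact hcov2 k hk helig hisS (by simp only [List.length_cons] at hkm ⊢; omega)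

theorem pvAFold (d : PySem.Dict String String) (hnd : d.keys.Nodup)
    (hsh : pvShapeB d = true) (hac : pvAcyclicB d = true) :
    ∀ (ks : List String), (∀ x ∈ ks, x ∈ d.keys) →
    ∀ (c : PySem.Dict String String) (S : String → Bool), pvGood d S c →
    ∃ S', (∀ j, S j = true → S' j = true) ∧
          pvGood d S' (ks.foldl (fun c i => (pvRecDecode (d.size + 1) c i).1) c) ∧
          (∀ k ∈ ks, pvEligP d k → (pvValStr d k).isSome = true → S' k = true) := by
  intro ks
  induction ks with
  | nil => intro _ c S hg; exact ⟨S, fun j h => h, hg, by simp⟩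
  | cons k ks ih =>
    intro hks c S hg
    have hmk := pv_measure_lt_size d hnd hsh hac k (hks k (by simp))
    obtain ⟨S1, hm1, hg1, hp1, _⟩ :=
      pvRecDecode_spec d hnd hsh hac (d.size + 1) k (by omega) c S hg
    obtain ⟨S2, hm2, hg2, hp2⟩ := ih (fun x hx => hks x (by simp [hx]))
      (pvRecDecode (d.size + 1) c k).1 S1 hg1
    refine ⟨S2, fun j h => hm2 j (hm1 j h), by simpa using hg2, ?_⟩
    intro k' hk' helig hisS
    rcases List.mem_cons.1 hk' with rfl | hk'
    · exact hm2 k' (hp1 helig hisS)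
    · exact hp2 k' hk' helig hisS

def pvCanon (d : PySem.Dict String String) : List (String × String) :=
  d.items.map (fun p =>
    if pvEligB p && (pvValStr d p.1).isSome then (p.1, (pvValStr d p.1).getD "") else p)

theorem pvGood_final_items (d : PySem.Dict String String) (hnd : d.keys.Nodup)
    (S : String → Bool) (c : PySem.Dict String String) (hg : pvGood d S c)
    (hfull : ∀ k ∈ d.keys, pvEligP d k → (pvValStr d k).isSome = true → S k = true) :
    c.items = pvCanon d := by
  rw [hg.1]
  apply List.map_congr_left
  rintro ⟨k, v⟩ hp
  have hget : d.get? k = some v := (PySem.Dict.get?_eq_some_iff_mem_items d k v hnd).2 hp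
  unfold pvTrans
  by_cases hS : S k = true
  · rw [if_pos (by simpa using hS)]
    obtain ⟨⟨hdk, w, hw, hdw, hwin⟩, hisS⟩ := hg.2 _ hS
    have hwv : w = v := by
      rw [hget] at hw
      exact (Option.some_inj.1 hw).symm
    rw [hwv] at hdw hwin
    have hcond : (pvEligB (k, v) && (pvValStr d (k, v).1).isSome) = true := by
      unfold pvEligB
      simp only [Bool.and_eq_true, Bool.not_eq_true']
      exact ⟨⟨⟨hdk, hdw⟩, hwin⟩, hisS⟩
    rw [hcond]
    simp
  · rw [if_neg (by simpa using hS)]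
    by_cases hcond : (pvEligB (k, v) && (pvValStr d (k, v).1).isSome) = true
    · exfalso
      simp only [Bool.and_eq_true] at hcond
      obtain ⟨he, hi⟩ := hcond
      unfold pvEligB at he
      simp only [Bool.and_eq_true, Bool.not_eq_true'] at he
      have helig : pvEligP d k := ⟨he.1.1, v, hget, he.1.2, he.2⟩
      have hk : k ∈ d.keys := by
        show k ∈ d.items.map (·.1)
        exact List.mem_map.2 ⟨(k, v), hp, rfl⟩
      exact hS (hfull k hk helig hi)
    · rw [Bool.not_eq_true] at hcond
      rw [hcond]
      simp

theorem pvParse_nodup (line : String) : (pvParse line).keys.Nodup := by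
  unfold pvParse
  have hany : ∀ (l : List String) (c : PySem.Dict String String), c.keys.Nodup →
      (l.foldl (fun d i =>
        if PySem.Str.isIn "=" i then
          d.insert (PySem.List.pyGetD (pvSplit i " = ") 0 "")
            (PySem.List.pyGetD (pvSplit i " = ") 1 "")
        else d) c).keys.Nodup := by
    intro l
    induction l with
    | nil => intro c h; exact h
    | cons x l ih =>
      intro c h
      simp only [List.foldl_cons]
      refine ih _ ?_
      split
      · exact PySem.Dict.nodup_keys_insert c _ _ h
      · exact h
  exact hany _ PySem.Dict.empty PySem.Dict.nodup_keys_empty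

theorem pv_length_pyRange (n : Nat) : (PySem.List.pyRange 0 (n : Int) 1).length = n := by
  rw [PySem.List.pyRange_of_pos 0 (n : Int) (by omega)]
  simp only [List.length_map, List.length_range]
  by_cases h : (0 : Int) < (n : Int)
  · rw [if_pos h]; omega
  · rw [if_neg h]; omega

theorem pvGood_init (d : PySem.Dict String String) : pvGood d (fun _ => false) d := by
  constructor
  · rw [List.map_congr_left (l := d.items) (f := pvTrans d (fun _ => false)) (g := fun p => p)
      (fun p _ => rfl)]
    rw [List.map_id']
  · intro k h
    simp at h

theorem pv_main_items (line : String) (hpre : Pre_crazyXORdecoding line) :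
    crazyXORdecoding line = crazyXORdecoding_alt line := by
  unfold Pre_crazyXORdecoding at hpre
  simp only [Bool.and_eq_true] at hpre
  obtain ⟨⟨hseg, hsh⟩, hac⟩ := hpre
  have hnd := pvParse_nodup line
  have hA : crazyXORdecoding line =
      ((pvParse line).keys.foldl
        (fun c i => (pvRecDecode ((pvParse line).size + 1) c i).1) (pvParse line)).items := rfl
  have hB : crazyXORdecoding_alt line =
      ((PySem.List.pyRange 0 ((pvParse line).size : Int) 1).foldl
        (fun c _ => c.keys.foldl pvBStep c) (pvParse line)).items := rfl
  obtain ⟨SA, _, hgA, hfullA⟩ := pvAFold (pvParse line) hnd hsh hac (pvParse line).keys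
    (fun x h => h) (pvParse line) (fun _ => false) (pvGood_init _)
  have hAitems := pvGood_final_items (pvParse line) hnd SA _ hgA hfullA
  obtain ⟨SB, hgB, hcovB⟩ := pvRounds (pvParse line) hnd hsh hac
    (PySem.List.pyRange 0 ((pvParse line).size : Int) 1) 0 (pvParse line) (fun _ => false)
    (pvGood_init _) (by intro k _ _ _ h; omega)
  have hfullB : ∀ k ∈ (pvParse line).keys, pvEligP (pvParse line) k →
      (pvValStr (pvParse line) k).isSome = true → SB k = true := by
    intro k hk helig hisS
    refine hcovB k hk helig hisS ?_
    rw [pv_length_pyRange]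
    have := pv_measure_lt_size (pvParse line) hnd hsh hac k hk
    omega
  have hBitems := pvGood_final_items (pvParse line) hnd SB _ hgB hfullB
  rw [hA, hB, hAitems, hBitems]

-- ===== VERDICT (by name: the statement is the Claim_ definition above) =====
theorem crazyXORdecoding_spec : Claim_equal_crazyXORdecoding := by
  intro line _ hpre
  unfold Spec_crazyXORdecoding
  exact pv_main_items line hpre
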